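-- pv_equiv track=rewrite | github.com/10TM/RemoteIdentification | app.py | getInn
-- ===== SOURCE A (Python) =====
-- def getInn (temp):
--     inn = str()
--     count = 0
--     for i in range(len(temp)):
--         if temp[i].isnumeric() == True or temp[i] == " ":
--             if temp[i] != " ":
--                 count = count + 1
--                 inn += temp[i]
--             if count == 14:
--                 break
--         else:
--             inn = ""
--             count = 0
--     return inn
-- ===== SOURCE B (Python) =====
-- def getInn(temp):
--     # Group-then-select: split temp into runs of (numeric or space) chars broken
--     # at any other char, keeping each run's digits; then pick the first run with
--     # >= 14 digits (truncated to 14), else the last run's digits.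
--     runs = []
--     cur = []
--     for c in temp:
--         if c.isnumeric() or c == " ":
--             if c != " ":
--                 cur.append(c)
--         else:
--             runs.append("".join(cur))
--             cur = []
--     runs.append("".join(cur))
--     for r in runs:
--         if len(r) >= 14:
--             return r[:14]
--     return runs[-1]
-- ===== Notes on version B (the rewrite author's own statement) =====
-- stated objective: alternative
-- what changed: Replaces A's single accumulate/reset pass with in-loop break by an explicit group-then-select decomposition: split the input into digit strings of maximal numeric-or-space runs, then pick the first run with >= 14 digits (truncated to 14) or else the last run's digits.
import Mathlib
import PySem

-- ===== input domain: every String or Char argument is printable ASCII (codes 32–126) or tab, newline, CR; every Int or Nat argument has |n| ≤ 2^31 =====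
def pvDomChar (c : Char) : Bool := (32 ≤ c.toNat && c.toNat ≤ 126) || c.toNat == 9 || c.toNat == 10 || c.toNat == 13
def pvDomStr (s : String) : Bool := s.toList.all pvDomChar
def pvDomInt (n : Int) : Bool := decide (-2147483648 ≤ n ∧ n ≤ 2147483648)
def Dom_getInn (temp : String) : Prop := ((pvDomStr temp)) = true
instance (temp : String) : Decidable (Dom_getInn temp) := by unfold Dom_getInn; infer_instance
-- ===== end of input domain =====

-- B replaces A's accumulate/reset single pass by an explicit group-then-select decomposition (objective: alternative).
-- On the ASCII domain, Python's c.isnumeric() is exactly PySem.Chars.isdigit.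
def pvOk (c : Char) : Bool := PySem.Chars.isdigit c || c == ' '

-- ===== PORT A =====
-- the loop of A: state (inn, count), early break at count == 14
def getInnGo : List Char → List Char → Nat → List Char
  | [], inn, _ => inn
  | c :: rest, inn, count =>
    if pvOk c then
      let inn' := if c ≠ ' ' then inn ++ [c] else inn
      let count' := if c ≠ ' ' then count + 1 else count
      if count' == 14 then inn' else getInnGo rest inn' count'
    else getInnGo rest [] 0

def getInn (temp : String) : String := String.ofList (getInnGo temp.toList [] 0)

-- ===== PORT B =====
-- build the runs' digit strings (final `runs.append(cur)` is the nil case)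
def altRuns : List Char → List Char → List (List Char)
  | [], cur => [cur]
  | c :: rest, cur =>
    if pvOk c then altRuns rest (if c ≠ ' ' then cur ++ [c] else cur)
    else cur :: altRuns rest []

-- `for r in runs: if len(r) >= 14: return r[:14]` then `return runs[-1]`
def altPick : List (List Char) → List Char
  | [] => []
  | [r] => if r.length ≥ 14 then r.take 14 else r
  | r :: rs => if r.length ≥ 14 then r.take 14 else altPick rs

def getInn_alt (temp : String) : String := String.ofList (altPick (altRuns temp.toList []))

-- ===== PRECONDITION & SPEC =====
def Spec_getInn (temp : String) (out : String) : Prop := out = getInn_alt temp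
instance (temp : String) (out : String) : Decidable (Spec_getInn temp out) := by unfold Spec_getInn; infer_instance

-- ===== CLAIM (what is proved, stated in full; the proofs are below) =====
def Claim_equal_getInn : Prop := ∀ (temp : String), Dom_getInn temp → Spec_getInn temp (getInn temp)

-- ===== LEMMAS AND PROOFS =====

theorem altRuns_ne_nil (cs cur : List Char) : altRuns cs cur ≠ [] := by
  induction cs generalizing cur with
  | nil => simp [altRuns]
  | cons c rest ih =>
    simp only [altRuns]
    split
    · exact ih _
    · simp

-- once a run has reached 14 digits, B returns its first 14 digits
theorem altPick_saturated (cs cur : List Char) (h : 14 ≤ cur.length) :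
    altPick (altRuns cs cur) = cur.take 14 := by
  induction cs generalizing cur with
  | nil => simp [altRuns, altPick, h]
  | cons c rest ih =>
    simp only [altRuns]
    split
    · split
      · rw [ih _ (by simp; omega)]
        rw [List.take_append_of_le_length h]
      · exact ih _ h
    · cases hr : altRuns rest [] with
      | nil => exact absurd hr (altRuns_ne_nil rest [])
      | cons r rs => simp [altPick, h]

-- main invariant: A's loop state (inn, inn.length) with inn.length < 14 matches B's pending run
theorem go_eq_pick (cs : List Char) : ∀ inn : List Char, inn.length < 14 →
    getInnGo cs inn inn.length = altPick (altRuns cs inn) := by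
  induction cs with
  | nil =>
    intro inn h
    simp only [getInnGo, altRuns, altPick]
    rw [if_neg (by omega)]
  | cons c rest ih =>
    intro inn h
    simp only [getInnGo, altRuns]
    split
    · by_cases hc : c ≠ ' '
      · simp only [if_pos hc]
        by_cases h14 : inn.length + 1 = 14
        · have : (inn.length + 1 == 14) = true := beq_iff_eq.mpr h14
          simp only [this, if_true]
          rw [altPick_saturated rest (inn ++ [c]) (by simp [h14]),
              List.take_of_length_le (by simp [h14])]
        · have : (inn.length + 1 == 14) = false := beq_eq_false_iff_ne.mpr h14
          simp only [this, Bool.false_eq_true, if_false]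
          have := ih (inn ++ [c]) (by simp; omega)
          simpa using this
      · simp only [if_neg hc]
        have : (inn.length == 14) = false := beq_eq_false_iff_ne.mpr (by omega)
        simp only [this, Bool.false_eq_true, if_false]
        exact ih inn h
    · cases hr : altRuns rest [] with
      | nil => exact absurd hr (altRuns_ne_nil rest [])
      | cons r rs =>
        have := ih [] (by simp)
        simp only [List.length_nil] at this
        rw [this, hr]
        simp only [altPick]
        rw [if_neg (by omega)]

-- ===== VERDICT (by name: the statement is the Claim_ definition above) =====
theorem getInn_spec : Claim_equal_getInn := by
  intro temp _
  unfold Spec_getInn getInn getInn_alt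
  rw [show (0 : Nat) = ([] : List Char).length from rfl, go_eq_pick temp.toList [] (by simp)]
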